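-- pv_equiv track=rewrite | github.com/charlesfranciscodev/codility | lesson4/max_counters.py | solution
-- ===== SOURCE A (Python) =====
-- def solution(n, a):
--     counters = []
--     max_counter = 0
--     prev_max_counter = 0
--
--     for i in range(1, n + 1):
--         counters.append(0)
--
--     for number in a:
--         if number == n + 1:
--             prev_max_counter = max_counter
--         else:
--             counters[number - 1] = max(counters[number - 1], prev_max_counter) + 1
--             max_counter = max(max_counter, counters[number - 1])
--
--     for i in range(0, n):
--         counters[i] = max(counters[i], prev_max_counter)
--
--     return counters
-- ===== SOURCE B (Python) =====
-- def solution(n, a):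
--     # Eager strategy: flush every counter at each max-all op; no lazy base, no final sweep.
--     counters = [0] * n
--     max_counter = 0
--     for number in a:
--         if number == n + 1:
--             counters = [max_counter] * n
--         else:
--             counters[number - 1] += 1
--             max_counter = max(max_counter, counters[number - 1])
--     return counters
-- ===== Notes on version B (the rewrite author's own statement) =====
-- stated objective: alternative
-- what changed: Replaces the lazy prev_max base and final sweep with an eager strategy that rewrites the whole counter list at every max-all operation and does plain increments otherwise.
import Mathlib
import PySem

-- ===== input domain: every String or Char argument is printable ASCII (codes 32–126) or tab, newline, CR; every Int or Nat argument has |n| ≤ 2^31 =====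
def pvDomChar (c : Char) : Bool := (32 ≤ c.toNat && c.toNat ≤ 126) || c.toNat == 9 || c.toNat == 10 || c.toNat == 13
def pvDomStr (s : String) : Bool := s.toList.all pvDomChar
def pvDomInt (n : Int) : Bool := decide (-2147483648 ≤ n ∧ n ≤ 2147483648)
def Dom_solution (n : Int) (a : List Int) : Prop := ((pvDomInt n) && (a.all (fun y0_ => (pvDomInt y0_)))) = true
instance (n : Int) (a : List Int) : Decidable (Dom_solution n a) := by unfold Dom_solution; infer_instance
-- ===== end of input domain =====

-- B replaces A's lazy prev_max base + final sweep by an eager flush of the whole counter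
-- list at every max-all operation (alternative decomposition; not faster).


-- ===== PORT A =====
-- lazy: counters hold raw values, prev_max_counter is a pending base, final sweep applies it
def solution (n : Int) (a : List Int) : List Int :=
  let counters : List Int := (PySem.List.pyRange 1 (n + 1) 1).foldl (fun cs _ => cs ++ [0]) []
  let st := a.foldl (fun (st : List Int × Int × Int) number =>
    match st with
    | (cs, maxc, prev) =>
      if number = n + 1 then (cs, maxc, maxc)
      else
        let v := max (PySem.List.pyGetD cs (number - 1) 0) prev + 1
        (PySem.List.pySetD cs (number - 1) v, max maxc v, prev))
    (counters, 0, 0)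
  (PySem.List.pyRange 0 n 1).foldl
    (fun cs i => PySem.List.pySetD cs i (max (PySem.List.pyGetD cs i 0) st.2.2)) st.1

-- ===== PORT B =====
-- eager: every max-all op rewrites the whole list; plain increments otherwise, no sweep
def solution_alt (n : Int) (a : List Int) : List Int :=
  (a.foldl (fun (st : List Int × Int) number =>
    match st with
    | (cs, maxc) =>
      if number = n + 1 then (List.replicate n.toNat maxc, maxc)
      else
        let v := PySem.List.pyGetD cs (number - 1) 0 + 1
        (PySem.List.pySetD cs (number - 1) v, max maxc v))
    (List.replicate n.toNat 0, 0)).1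

-- ===== PRECONDITION & SPEC =====
-- Pre_ excludes exactly the inputs on which A (and B alike) raises IndexError:
-- an element that is neither n+1 nor a valid Python index number-1 into the n counters.
def Pre_solution (n : Int) (a : List Int) : Prop :=
  ∀ x ∈ a, x = n + 1 ∨ PySem.Raise.InRange n.toNat (x - 1)
instance (n : Int) (a : List Int) : Decidable (Pre_solution n a) := by
  unfold Pre_solution PySem.Raise.InRange; infer_instance

def pvWitness_solution : Int × List Int := (5, [3, 4, 4, 6, 1, 4, 4])

def Spec_solution (n : Int) (a : List Int) (out : List Int) : Prop := out = solution_alt n a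
instance (n : Int) (a : List Int) (out : List Int) : Decidable (Spec_solution n a out) := by unfold Spec_solution; infer_instance

-- ===== CLAIM (what is proved, stated in full; the proofs are below) =====
def Claim_equal_solution : Prop := ∀ (n : Int) (a : List Int), Dom_solution n a → Pre_solution n a → Spec_solution n a (solution n a)

-- ===== LEMMAS AND PROOFS =====

-- a valid Python index normalizes to a Nat position below the length
lemma pyIdx_norm (L : Nat) (i : Int) (h : PySem.Raise.InRange L i) :
    ∃ j : Nat, PySem.List.pyIdx? L i = some j ∧ j < L := by
  obtain ⟨h1, h2⟩ := h
  unfold PySem.List.pyIdx?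
  split_ifs <;>
    first
      | omega
      | exact ⟨i.toNat, rfl, by omega⟩
      | exact ⟨L - (-i).toNat, rfl, by omega⟩

lemma pyGetD_norm {xs : List Int} {i : Int} {j : Nat} {d : Int}
    (hj : PySem.List.pyIdx? xs.length i = some j) (hlt : j < xs.length) :
    PySem.List.pyGetD xs i d = xs[j] := by
  simp [PySem.List.pyGetD, PySem.List.pyGet?, hj, List.getElem?_eq_getElem hlt]

lemma pySetD_norm {xs : List Int} {i : Int} {j : Nat} {v : Int}
    (hj : PySem.List.pyIdx? xs.length i = some j) :
    PySem.List.pySetD xs i v = xs.set j v := by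
  simp [PySem.List.pySetD, PySem.List.pySet?, hj]

-- the init loop 'for i in range(1, n+1): counters.append(0)' builds a block of zeros
lemma foldl_append_const (c : Int) :
    ∀ (l : List Int) (init : List Int),
      l.foldl (fun cs _ => cs ++ [c]) init = init ++ List.replicate l.length c := by
  intro l
  induction l with
  | nil => simp
  | cons x t ih =>
    intro init
    simp only [List.foldl_cons, ih, List.length_cons, List.replicate_succ]
    rw [List.append_assoc]
    simp

-- a list all of whose elements are ≤ m maps under (max · m) to a constant block of m
lemma map_max_eq_replicate (m : Int) :
    ∀ (l : List Int), (∀ c ∈ l, c ≤ m) →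
      l.map (fun c => max c m) = List.replicate l.length m := by
  intro l
  induction l with
  | nil => intro _; simp
  | cons x t ih =>
    intro h
    have hx : x ≤ m := h x (by simp)
    simp only [List.map_cons, List.length_cons, List.replicate_succ]
    rw [ih (fun c hc => h c (by simp [hc]))]
    simp [max_eq_right hx]

-- setting just past a prefix
lemma set_append_length :
    ∀ (pre : List Int) (c v : Int) (suf : List Int),
      (pre ++ c :: suf).set pre.length v = pre ++ v :: suf := by
  intro pre
  induction pre with
  | nil => intro c v suf; simp
  | cons p t ih => intro c v suf; simp [ih]

-- getting just past a prefix
lemma getD_append_length (pre : List Int) (c : Int) (suf : List Int) (d : Int) :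
    PySem.List.pyGetD (pre ++ c :: suf) (pre.length : Int) d = c := by
  rw [PySem.List.pyGetD, PySem.List.pyGet?_append_length]
  rfl

-- the final sweep 'for i in range(0, len(cs)): cs[i] = max(cs[i], p)' is a pointwise max
lemma sweep_gen (p : Int) :
    ∀ (suf pre : List Int),
      (PySem.List.pyRange (pre.length : Int) ((pre.length : Int) + (suf.length : Int)) 1).foldl
        (fun cs i => PySem.List.pySetD cs i (max (PySem.List.pyGetD cs i 0) p)) (pre ++ suf)
      = pre ++ suf.map (fun c => max c p) := by
  intro suf
  induction suf with
  | nil =>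
    intro pre
    rw [PySem.List.pyRange_one_eq_nil (by simp)]
    simp
  | cons c t ih =>
    intro pre
    rw [PySem.List.pyRange_one_cons (by push_cast [List.length_cons]; omega)]
    simp only [List.foldl_cons]
    rw [getD_append_length, PySem.List.pySetD_natCast, set_append_length]
    have h1 : pre ++ max c p :: t = (pre ++ [max c p]) ++ t := by simp
    have h2 : (pre.length : Int) + 1 = ((pre ++ [max c p]).length : Int) := by
      push_cast [List.length_append, List.length_cons, List.length_nil]; ring
    have h3 : (pre.length : Int) + ((c :: t).length : Int)
        = ((pre ++ [max c p]).length : Int) + (t.length : Int) := by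
      push_cast [List.length_append, List.length_cons, List.length_nil]; ring
    rw [h1, h3, h2, ih]
    simp

-- the main loop invariant: the eager fold tracks the lazy one state-for-state
lemma loop_inv (n : Int) (L : Nat) (hLn : n.toNat = L) :
    ∀ (a : List Int) (csA : List Int) (maxc prev : Int) (csB : List Int),
      (∀ x ∈ a, x = n + 1 ∨ PySem.Raise.InRange L (x - 1)) →
      csA.length = L →
      csB = csA.map (fun c => max c prev) →
      (∀ c ∈ csA, c ≤ maxc) → prev ≤ maxc →
      (let sA := a.foldl (fun (st : List Int × Int × Int) number =>
          match st with
          | (cs, mc, pv) =>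
            if number = n + 1 then (cs, mc, mc)
            else
              let v := max (PySem.List.pyGetD cs (number - 1) 0) pv + 1
              (PySem.List.pySetD cs (number - 1) v, max mc v, pv)) (csA, maxc, prev)
       let sB := a.foldl (fun (st : List Int × Int) number =>
          match st with
          | (cs, mc) =>
            if number = n + 1 then (List.replicate n.toNat mc, mc)
            else
              let v := PySem.List.pyGetD cs (number - 1) 0 + 1
              (PySem.List.pySetD cs (number - 1) v, max mc v)) (csB, maxc)
       sB.1 = sA.1.map (fun c => max c sA.2.2) ∧ sB.2 = sA.2.1
         ∧ sA.1.length = L ∧ (∀ c ∈ sA.1, c ≤ sA.2.1) ∧ sA.2.2 ≤ sA.2.1) := by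
  intro a
  induction a with
  | nil =>
    intro csA maxc prev csB _ hlen hmap hbound hprev
    exact ⟨hmap, rfl, hlen, hbound, hprev⟩
  | cons x t ih =>
    intro csA maxc prev csB hpre hlen hmap hbound hprev
    have hpt : ∀ y ∈ t, y = n + 1 ∨ PySem.Raise.InRange L (y - 1) :=
      fun y hy => hpre y (by simp [hy])
    by_cases hx : x = n + 1
    · -- max-all operation: A records the base, B flushes the whole list
      simp only [List.foldl_cons, if_pos hx]
      have hflush : List.replicate n.toNat maxc = csA.map (fun c => max c maxc) := by
        rw [map_max_eq_replicate maxc csA hbound, hlen, hLn]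
      exact ih csA maxc maxc (List.replicate n.toNat maxc) hpt hlen hflush hbound le_rfl
    · -- increment operation: both update the same position with the same value
      have hin : PySem.Raise.InRange L (x - 1) := (hpre x (by simp)).resolve_left hx
      obtain ⟨j, hj, hjL⟩ := pyIdx_norm L (x - 1) hin
      have hjA : PySem.List.pyIdx? csA.length (x - 1) = some j := by rw [hlen]; exact hj
      have hlenB : csB.length = L := by rw [hmap]; simp [hlen]
      have hjB : PySem.List.pyIdx? csB.length (x - 1) = some j := by rw [hlenB]; exact hj
      have hjA' : j < csA.length := by omega
      have hjB' : j < csB.length := by omega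
      simp only [List.foldl_cons, if_neg hx]
      rw [pyGetD_norm hjA hjA', pySetD_norm hjA,
          pyGetD_norm hjB hjB', pySetD_norm hjB]
      have hBj : csB[j] = max csA[j] prev := by
        subst hmap; simp
      set v : Int := max csA[j] prev + 1 with hv
      have hvB : csB[j] + 1 = v := by rw [hBj]
      have hvp : prev < v := by omega
      have hmap' : csB.set j (csB[j] + 1)
          = (csA.set j v).map (fun c => max c prev) := by
        rw [hvB, List.map_set, hmap]
        congr 1
        omega
      have hbound' : ∀ c ∈ csA.set j v, c ≤ max maxc v := by
        intro c hc
        rcases List.mem_or_eq_of_mem_set hc with h | h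
        · exact le_trans (hbound c h) (le_max_left _ _)
        · rw [h]; exact le_max_right _ _
      have := ih (csA.set j v) (max maxc v) prev (csB.set j (csB[j] + 1)) hpt
        (by simp [hlen]) hmap' hbound' (le_trans hprev (le_max_left _ _))
      simpa [hvB] using this
    
-- ===== VERDICT (by name: the statement is the Claim_ definition above) =====
theorem solution_spec : Claim_equal_solution := by
  unfold Claim_equal_solution
  intro n a _ hpre
  unfold Spec_solution solution solution_alt
  simp only []
  have hinit : (PySem.List.pyRange 1 (n + 1) 1).foldl (fun cs _ => cs ++ [0]) ([] : List Int)
      = List.replicate n.toNat (0 : Int) := by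
    have hlr : (n + 1 - 1).toNat = n.toNat := by omega
    rw [foldl_append_const, PySem.List.length_pyRange_one, hlr, List.nil_append]
  have hmap0 : List.replicate n.toNat (0 : Int)
      = (List.replicate n.toNat (0 : Int)).map (fun c => max c 0) := by
    simp [List.map_replicate]
  have hbound0 : ∀ c ∈ List.replicate n.toNat (0 : Int), c ≤ (0 : Int) := by
    intro c hc
    rw [List.eq_of_mem_replicate hc]
  have h := loop_inv n n.toNat rfl a (List.replicate n.toNat 0) 0 0
    (List.replicate n.toNat 0) hpre (by simp) hmap0 hbound0 le_rfl
  rw [hinit]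
  obtain ⟨hB, _, hlenA, _, _⟩ := h
  rw [hB]
  -- it remains to show the final sweep equals the pointwise max
  set sA := a.foldl (fun (st : List Int × Int × Int) number =>
      match st with
      | (cs, mc, pv) =>
        if number = n + 1 then (cs, mc, mc)
        else
          let v := max (PySem.List.pyGetD cs (number - 1) 0) pv + 1
          (PySem.List.pySetD cs (number - 1) v, max mc v, pv))
    (List.replicate n.toNat (0 : Int), (0 : Int), (0 : Int)) with hsA
  by_cases hn : 0 < n
  · have hcast : ((sA.1.length : Int)) = n := by rw [hlenA]; omega
    have hrange : PySem.List.pyRange 0 n 1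
        = PySem.List.pyRange ((([] : List Int).length : Int))
            ((([] : List Int).length : Int) + (sA.1.length : Int)) 1 := by
      simp [hcast]
    rw [hrange]
    have := sweep_gen sA.2.2 sA.1 []
    simpa using this
  · have h0 : sA.1 = [] := by
      have : sA.1.length = 0 := by omega
      exact List.eq_nil_of_length_eq_zero this
    rw [PySem.List.pyRange_one_eq_nil (by omega), h0]
    simp
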